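-- pv_equiv track=rewrite | github.com/avocado-framework-tests/avocado-misc-tests | dlpar/dlpar_main.py | cpu_payload_data
-- ===== SOURCE A (Python) =====
-- def cpu_payload_data(max_value, curr_proc, step=1):
--     index_list = []
--     current_sum = curr_proc
--     index = 0
--
--     while True:
--         # Calculate the next index value to add
--         next_index_value = index
--
--         # Check if adding the next index value exceeds the max_value
--         if (current_sum + next_index_value) > max_value:
--             break  # If exceeding, stop adding more index values
--
--         # Add the next index value to the list
--         index_list.append(next_index_value)
--         current_sum += next_index_value
--         index += step  # Increment index by the specified step
--
--     return [value for value in index_list if value != 0]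
-- ===== SOURCE B (Python) =====
-- def cpu_payload_data(max_value, curr_proc, step=1):
--     # A appends k*step for every k >= 1 with curr_proc + step*k*(k+1)/2 <= max_value.
--     # Find that largest K by integer binary search on k*(k+1) <= t, t = 2*(max_value-curr_proc)//step.
--     if curr_proc > max_value:
--         return []
--     t = (2 * (max_value - curr_proc)) // step
--     lo, hi = 0, t + 1
--     while hi - lo > 1:
--         mid = (lo + hi) // 2
--         if mid * (mid + 1) <= t:
--             lo = mid
--         else:
--             hi = mid
--     return [k * step for k in range(1, lo + 1)]
-- ===== Notes on version B (the rewrite author's own statement) =====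
-- stated objective: alternative
-- what changed: Replaces A's cumulative-sum while-loop (one iteration per emitted multiple) with a closed-form reduction of the stop condition to k*(k+1) <= 2*(max_value-curr_proc)//step, solved for the largest valid K by an integer binary search, then one comprehension emits [k*step for k in 1..K].
import Mathlib
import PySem

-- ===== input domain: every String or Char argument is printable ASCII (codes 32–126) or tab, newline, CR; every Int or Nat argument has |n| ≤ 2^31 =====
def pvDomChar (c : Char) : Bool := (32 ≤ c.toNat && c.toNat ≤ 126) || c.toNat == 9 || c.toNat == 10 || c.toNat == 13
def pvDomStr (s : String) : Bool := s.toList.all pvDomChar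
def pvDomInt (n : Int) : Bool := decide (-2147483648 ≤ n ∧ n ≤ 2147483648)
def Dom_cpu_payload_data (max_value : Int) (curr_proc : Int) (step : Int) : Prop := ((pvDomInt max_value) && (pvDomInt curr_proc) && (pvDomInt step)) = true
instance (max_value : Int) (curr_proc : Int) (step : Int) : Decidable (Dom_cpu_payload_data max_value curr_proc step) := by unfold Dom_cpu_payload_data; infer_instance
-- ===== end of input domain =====

-- B replaces A's cumulative-sum while-loop by an integer binary search for the largest
-- admissible multiplier K, then emits [k*step for k in 1..K]; objective: alternative algorithm.


-- ===== PORT A =====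
-- A's 'while True' loop; the fuel only makes it total (on Pre_ inputs it is never exhausted, proved below)
def aLoop (max_value : Int) (step : Int) : Nat → List Int → Int → Int → List Int
  | 0, acc, _, _ => acc
  | f + 1, acc, current_sum, index =>
    if current_sum + index > max_value then acc
    else aLoop max_value step f (acc ++ [index]) (current_sum + index) (index + step)

def cpu_payload_data (max_value : Int) (curr_proc : Int) (step : Int) : List Int :=
  (aLoop max_value step ((max_value - curr_proc + 2).toNat + 2) [] curr_proc 0).filter
    (fun value => value != 0)

-- ===== PORT B =====
-- binary search: largest lo with lo*(lo+1) <= t (invariant: lo succeeds, hi fails);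
-- the Nat fuel (initial gap) only makes the while-loop total: the gap shrinks every turn
def bSearchGo (t : Int) : Nat → Int → Int → Int
  | 0, lo, _ => lo
  | f + 1, lo, hi =>
    if hi - lo > 1 then
      if (PySem.Int.floordiv (lo + hi) 2) * (PySem.Int.floordiv (lo + hi) 2 + 1) ≤ t then
        bSearchGo t f (PySem.Int.floordiv (lo + hi) 2) hi
      else
        bSearchGo t f lo (PySem.Int.floordiv (lo + hi) 2)
    else lo

def bSearch (t : Int) (lo : Int) (hi : Int) : Int := bSearchGo t (hi - lo).toNat lo hi

def cpu_payload_data_alt (max_value : Int) (curr_proc : Int) (step : Int) : List Int :=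
  if curr_proc > max_value then []
  else
    let t := PySem.Int.floordiv (2 * (max_value - curr_proc)) step
    let lo := bSearch t 0 (t + 1)
    (PySem.List.pyRange 1 (lo + 1) 1).map (fun k => k * step)

-- ===== PRECONDITION & SPEC =====
-- Pre_ excludes only inputs on which Python A never returns: with step ≤ 0 and
-- curr_proc ≤ max_value the while-loop never terminates (index never grows past the budget).
def Pre_cpu_payload_data (max_value : Int) (curr_proc : Int) (step : Int) : Prop :=
  1 ≤ step ∨ max_value < curr_proc
instance (max_value : Int) (curr_proc : Int) (step : Int) : Decidable (Pre_cpu_payload_data max_value curr_proc step) := by unfold Pre_cpu_payload_data; infer_instance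

def pvWitness_cpu_payload_data : Int × Int × Int := (10, 0, 1)

def Spec_cpu_payload_data (max_value : Int) (curr_proc : Int) (step : Int) (out : List Int) : Prop := out = cpu_payload_data_alt max_value curr_proc step
instance (max_value : Int) (curr_proc : Int) (step : Int) (out : List Int) : Decidable (Spec_cpu_payload_data max_value curr_proc step out) := by unfold Spec_cpu_payload_data; infer_instance

-- ===== CLAIM (what is proved, stated in full; the proofs are below) =====
def Claim_equal_cpu_payload_data : Prop := ∀ (max_value : Int) (curr_proc : Int) (step : Int), Dom_cpu_payload_data max_value curr_proc step → Pre_cpu_payload_data max_value curr_proc step → Spec_cpu_payload_data max_value curr_proc step (cpu_payload_data max_value curr_proc step)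

-- ===== LEMMAS AND PROOFS =====

lemma bSearchGo_spec (t : Int) : ∀ (f : Nat) (lo hi : Int),
    0 ≤ lo → lo < hi → hi - lo ≤ (f : Int) + 1 → lo * (lo + 1) ≤ t → t < hi * (hi + 1) →
    0 ≤ bSearchGo t f lo hi ∧ (bSearchGo t f lo hi) * (bSearchGo t f lo hi + 1) ≤ t ∧
      t < (bSearchGo t f lo hi + 1) * (bSearchGo t f lo hi + 2) := by
  intro f
  induction f with
  | zero =>
    intro lo hi h0 hlt hgap h1 h2
    have heq : hi = lo + 1 := by push_cast at hgap; omega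
    subst heq
    refine ⟨h0, h1, ?_⟩
    simp only [bSearchGo]
    linarith
  | succ f ih =>
    intro lo hi h0 hlt hgap h1 h2
    simp only [bSearchGo]
    by_cases hbig : hi - lo > 1
    · rw [if_pos hbig]
      have hmid : PySem.Int.floordiv (lo + hi) 2 = (lo + hi) / 2 :=
        PySem.Int.floordiv_eq_ediv_of_pos (by omega)
      have hb1 : lo + 1 ≤ PySem.Int.floordiv (lo + hi) 2 := by rw [hmid]; omega
      have hb2 : PySem.Int.floordiv (lo + hi) 2 ≤ hi - 1 := by rw [hmid]; omega
      set mid := PySem.Int.floordiv (lo + hi) 2 with hm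
      by_cases hc : mid * (mid + 1) ≤ t
      · rw [if_pos hc]
        exact ih mid hi (by omega) (by omega) (by push_cast; push_cast at hgap; omega) hc h2
      · rw [if_neg hc]
        exact ih lo mid h0 (by omega) (by push_cast; push_cast at hgap; omega) h1 (by omega)
    · rw [if_neg hbig]
      have heq : hi = lo + 1 := by omega
      subst heq
      exact ⟨h0, h1, by linarith⟩

lemma bSearch_spec (t lo hi : Int) (h0 : 0 ≤ lo) (hlt : lo < hi)
    (h1 : lo * (lo + 1) ≤ t) (h2 : t < hi * (hi + 1)) :
    0 ≤ bSearch t lo hi ∧ (bSearch t lo hi) * (bSearch t lo hi + 1) ≤ t ∧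
      t < (bSearch t lo hi + 1) * (bSearch t lo hi + 2) := by
  unfold bSearch
  exact bSearchGo_spec t ((hi - lo).toNat) lo hi h0 hlt (by omega) h1 h2

lemma aLoop_run (max_value curr_proc step : Int) (hstep : 1 ≤ step) (K : Int) (hK0 : 0 ≤ K)
    (hKiff : ∀ k : Int, 0 ≤ k → ((2 * curr_proc + step * (k * (k + 1)) ≤ 2 * max_value) ↔ k ≤ K)) :
    ∀ (f : Nat) (k cs : Int) (acc : List Int), 0 ≤ k → k ≤ K + 1 →
      2 * cs = 2 * curr_proc + step * (k * (k - 1)) → K + 1 - k < (f : Int) →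
      aLoop max_value step f acc cs (step * k) =
        acc ++ (PySem.List.pyRange k (K + 1) 1).map (fun j => step * j) := by
  intro f
  induction f with
  | zero => intro k cs acc h0 hk hcs hf; simp at hf; omega
  | succ f ih =>
    intro k cs acc h0 hk hcs hf
    simp only [aLoop]
    by_cases hcond : cs + step * k > max_value
    · -- loop breaks: k = K + 1
      have hkK : ¬ (k ≤ K) := by
        intro hle
        have := (hKiff k h0).mpr hle
        nlinarith
      have hkeq : k = K + 1 := by omega
      rw [if_pos hcond, hkeq, PySem.List.pyRange_one_eq_nil (by omega)]
      simp
    · rw [if_neg hcond]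
      have hkK : k ≤ K := by
        have := (hKiff k h0).mp (by nlinarith)
        exact this
      have hstepk : step * k + step = step * (k + 1) := by ring
      rw [hstepk]
      rw [ih (k + 1) (cs + step * k) (acc ++ [step * k]) (by omega) (by omega)
        (by ring_nf; ring_nf at hcs; linarith) (by omega)]
      rw [PySem.List.pyRange_one_cons (by omega : k < K + 1)]
      simp

theorem cpu_payload_data_spec : Claim_equal_cpu_payload_data := by
  intro max_value curr_proc step _ hpre
  unfold Spec_cpu_payload_data cpu_payload_data cpu_payload_data_alt
  by_cases hgt : curr_proc > max_value
  · -- first check breaks immediately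
    rw [if_pos hgt]
    have h2 : (max_value - curr_proc + 2).toNat + 2 = ((max_value - curr_proc + 2).toNat + 1) + 1 := by omega
    rw [h2]
    simp only [aLoop]
    rw [if_pos (by omega : curr_proc + 0 > max_value)]
    simp
  · rw [if_neg hgt]
    have hle : curr_proc ≤ max_value := by omega
    have hstep : 1 ≤ step := by
      rcases hpre with h | h
      · exact h
      · omega
    set t := PySem.Int.floordiv (2 * (max_value - curr_proc)) step with ht
    have htediv : t = (2 * (max_value - curr_proc)) / step :=
      PySem.Int.floordiv_eq_ediv_of_pos (by omega)
    have ht0 : 0 ≤ t := by rw [htediv]; exact Int.ediv_nonneg (by omega) (by omega)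
    have htle : t ≤ 2 * (max_value - curr_proc) := by
      rw [htediv]; exact Int.ediv_le_self _ (by omega)
    obtain ⟨hK0, hK1, hK2⟩ := bSearch_spec t 0 (t + 1) le_rfl (by omega)
      (by simpa using ht0) (by nlinarith)
    set K := bSearch t 0 (t + 1) with hKdef
    have hKiff : ∀ k : Int, 0 ≤ k →
        ((2 * curr_proc + step * (k * (k + 1)) ≤ 2 * max_value) ↔ k ≤ K) := by
      intro k hk
      constructor
      · intro h
        have hkk : k * (k + 1) ≤ t := by
          rw [ht, PySem.Int.le_floordiv_iff_mul_le (by omega)]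
          nlinarith
        by_contra hcon
        push_neg at hcon
        nlinarith
      · intro h
        have hkk : k * (k + 1) ≤ t := by nlinarith
        have := (PySem.Int.le_floordiv_iff_mul_le (by omega : (0:Int) < step)).mp (ht ▸ hkk)
        nlinarith
    have hKbd : K ≤ max_value - curr_proc := by nlinarith [sq_nonneg (K - 1)]
    have hfuel : ((max_value - curr_proc + 2).toNat + 2 : Int) = max_value - curr_proc + 4 := by
      omega
    have hrun := aLoop_run max_value curr_proc step hstep K hK0 hKiff
      ((max_value - curr_proc + 2).toNat + 2) 0 curr_proc [] le_rfl (by omega)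
      (by ring) (by omega)
    simp only [mul_zero] at hrun
    show (aLoop max_value step ((max_value - curr_proc + 2).toNat + 2) [] curr_proc 0).filter
        (fun value => value != 0) =
      (PySem.List.pyRange 1 (K + 1) 1).map (fun k => k * step)
    rw [hrun]
    rw [PySem.List.pyRange_one_cons (by omega : (0:Int) < K + 1)]
    simp only [List.nil_append, List.map_cons, mul_zero, List.filter_cons]
    have h00 : ((0 : Int) != 0) = false := by simp
    rw [h00]
    simp only [Bool.false_eq_true, if_false]
    rw [List.filter_eq_self.mpr]
    · apply List.map_congr_left
      intro j _
      exact mul_comm step j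
    · intro x hx
      simp only [List.mem_map] at hx
      obtain ⟨j, hj, rfl⟩ := hx
      rw [PySem.List.mem_pyRange_one] at hj
      have : 0 < step * j := by nlinarith [hj.1]
      simpa using by omega
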